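-- pv_equiv track=rewrite | github.com/WekisleySouza/Python-Course-06-03-2022 | DesafioListas.py | doppel
-- ===== SOURCE A (Python) =====
-- def doppel(lista):
--     listaTemp = list()
--     listaRep = list()
--
--     for subLista in lista:
--         for item in subLista:
--             if not item in listaTemp:
--                 listaTemp.append(item)
--
--             elif not item in listaRep:
--                 listaRep.append(item)
--
--         del listaTemp[0:]
--
--     if listaRep:
--         return True
--     else:
--         return False
-- ===== SOURCE B (Python) =====
-- def doppel(lista):
--     return any(len(set(sub)) != len(sub) for sub in lista)
-- ===== Notes on version B (the rewrite author's own statement) =====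
-- stated objective: faster
-- what changed: Replaces the element-wise seen/repeated list accumulation with clearing per sublist by a single any() over sublists comparing len(set(sub)) to len(sub).
import Mathlib
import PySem

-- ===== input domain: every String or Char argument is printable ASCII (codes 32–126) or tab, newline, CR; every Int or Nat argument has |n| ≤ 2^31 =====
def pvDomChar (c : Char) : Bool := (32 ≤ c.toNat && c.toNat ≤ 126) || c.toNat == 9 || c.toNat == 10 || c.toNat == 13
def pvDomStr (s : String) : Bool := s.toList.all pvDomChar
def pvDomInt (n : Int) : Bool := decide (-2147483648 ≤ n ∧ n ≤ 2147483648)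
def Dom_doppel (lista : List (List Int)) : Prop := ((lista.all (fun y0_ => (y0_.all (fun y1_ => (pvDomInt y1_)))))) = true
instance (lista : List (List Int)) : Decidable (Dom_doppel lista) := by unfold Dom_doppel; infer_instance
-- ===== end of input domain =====

-- B replaces A's seen/repeated list accumulation (cleared per sublist) by one any() comparing len(set(sub)) with len(sub).

-- ===== PORT A =====
-- inner loop body: state = (listaTemp, listaRep)
def doppelInner (st : List Int × List Int) (item : Int) : List Int × List Int :=
  if ¬ st.1.contains item then (st.1 ++ [item], st.2)
  else if ¬ st.2.contains item then (st.1, st.2 ++ [item])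
  else st

def doppel (lista : List (List Int)) : Bool :=
  -- 'del listaTemp[0:]' after each sublist: each sublist starts with listaTemp = []
  let listaRep := lista.foldl (fun rep subLista => (subLista.foldl doppelInner ([], rep)).2) []
  if listaRep.isEmpty then false else true

-- ===== PORT B =====
def doppel_alt (lista : List (List Int)) : Bool :=
  lista.any (fun sub => (PySem.Set.ofList sub).length != sub.length)

-- ===== PRECONDITION & SPEC =====
def Spec_doppel (lista : List (List Int)) (out : Bool) : Prop := out = doppel_alt lista
instance (lista : List (List Int)) (out : Bool) : Decidable (Spec_doppel lista out) := by unfold Spec_doppel; infer_instance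

-- ===== CLAIM (what is proved, stated in full; the proofs are below) =====
def Claim_equal_doppel : Prop := ∀ (lista : List (List Int)), Dom_doppel lista → Spec_doppel lista (doppel lista)

-- ===== LEMMAS AND PROOFS =====

-- the inner loop leaves listaRep empty iff it started empty, the sublist has no repeat, and nothing collides with listaTemp
theorem doppelInner_empty (sub : List Int) :
    ∀ (temp rep : List Int),
      ((sub.foldl doppelInner (temp, rep)).2 = []) ↔
        (rep = [] ∧ sub.Nodup ∧ ∀ x ∈ sub, x ∉ temp) := by
  induction sub with
  | nil => intro temp rep; simp
  | cons x xs ih =>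
    intro temp rep
    simp only [List.foldl_cons, doppelInner]
    by_cases hx : x ∈ temp
    · by_cases hr : x ∈ rep
      · simp only [List.contains_iff_mem, hx, hr, not_true, ite_false]
        rw [ih]
        constructor
        · rintro ⟨h, -⟩; exact absurd (h ▸ hr) (List.not_mem_nil)
        · rintro ⟨-, -, h⟩; exact absurd hx (h x (by simp))
      · simp only [List.contains_iff_mem, hx, hr, not_true, not_false_iff, ite_false, ite_true]
        rw [ih]
        constructor
        · rintro ⟨h, -⟩; simp at h
        · rintro ⟨-, -, h⟩; exact absurd hx (h x (by simp))
    · simp only [List.contains_iff_mem, hx, not_false_iff, ite_true]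
      rw [ih]
      constructor
      · rintro ⟨h1, h2, h3⟩
        refine ⟨h1, ?_, ?_⟩
        · exact List.nodup_cons.mpr ⟨fun hm => (h3 x hm) (by simp), h2⟩
        · intro y hy
          rcases List.mem_cons.mp hy with h | h
          · exact h ▸ hx
          · intro hyt; exact (h3 y h) (List.mem_append.mpr (Or.inl hyt))
      · rintro ⟨h1, h2, h3⟩
        rcases List.nodup_cons.mp h2 with ⟨hxxs, hnd⟩
        refine ⟨h1, hnd, ?_⟩
        intro y hy hym
        rcases List.mem_append.mp hym with h | h
        · exact (h3 y (by simp [hy])) h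
        · simp at h; exact hxxs (h ▸ hy)
  
-- the outer loop leaves listaRep empty iff it started empty and every sublist is duplicate-free
theorem doppelOuter_empty (lista : List (List Int)) :
    ∀ (rep : List Int),
      ((lista.foldl (fun rep sub => (sub.foldl doppelInner ([], rep)).2) rep) = []) ↔
        (rep = [] ∧ ∀ sub ∈ lista, sub.Nodup) := by
  induction lista with
  | nil => intro rep; simp
  | cons s ss ih =>
    intro rep
    simp only [List.foldl_cons]
    rw [ih, doppelInner_empty]
    simp only [List.mem_cons]
    constructor
    · rintro ⟨⟨h1, h2, -⟩, h3⟩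
      exact ⟨h1, fun sub hs => hs.elim (fun e => e ▸ h2) (h3 sub)⟩
    · rintro ⟨h1, h2⟩
      exact ⟨⟨h1, h2 s (Or.inl rfl), by simp⟩, fun sub hs => h2 sub (Or.inr hs)⟩

-- set(sub) is a sublist of sub (first occurrences kept in order)
theorem ofList_sublist (xs : List Int) : (PySem.Set.ofList xs).Sublist xs := by
  induction xs with
  | nil => simp [PySem.Set.ofList_nil]
  | cons x xs ih =>
    rw [PySem.Set.ofList_cons]
    have hd : List.Sublist ((PySem.Set.ofList xs).discard x) (PySem.Set.ofList xs) := by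
      simp only [PySem.Set.discard]; exact List.filter_sublist
    exact List.Sublist.cons₂ x (hd.trans ih)

-- len(set(sub)) = len(sub) iff sub has no repeated element
theorem ofList_length_iff (xs : List Int) :
    ((PySem.Set.ofList xs).length = xs.length) ↔ xs.Nodup := by
  constructor
  · intro h
    have := (ofList_sublist xs).eq_of_length h
    exact this ▸ PySem.Set.nodup_ofList xs
  · intro h; exact congrArg List.length (PySem.Set.ofList_eq_self_of_nodup xs h)

-- ===== VERDICT (by name: the statement is the Claim_ definition above) =====
theorem doppel_spec : Claim_equal_doppel := by
  intro lista _
  unfold Spec_doppel doppel doppel_alt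
  show (if (List.foldl (fun rep subLista => (List.foldl doppelInner ([], rep) subLista).2) [] lista).isEmpty = true then false else true) = lista.any fun sub => List.length (PySem.Set.ofList sub) != sub.length
  by_cases he : (lista.foldl (fun rep subLista => (subLista.foldl doppelInner ([], rep)).2) []) = []
  · have hall := ((doppelOuter_empty lista []).mp he).2
    rw [he]
    simp only [List.isEmpty_nil, if_true]
    symm
    rw [List.any_eq_false]
    intro sub hm
    simp only [bne_iff_ne, ne_eq, not_not]
    exact (ofList_length_iff sub).mpr (hall sub hm)
  · have hne : (lista.foldl (fun rep subLista => (subLista.foldl doppelInner ([], rep)).2) []).isEmpty = false := by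
      simpa [List.isEmpty_iff] using he
    rw [hne]
    simp only [Bool.false_eq_true, if_false]
    symm
    have hex : ∃ sub ∈ lista, ¬ sub.Nodup := by
      by_contra hc
      push Not at hc
      exact he ((doppelOuter_empty lista []).mpr ⟨rfl, hc⟩)
    rcases hex with ⟨sub, hm, hnd⟩
    refine List.any_eq_true.mpr ⟨sub, hm, ?_⟩
    simp only [bne_iff_ne, ne_eq]
    exact fun hl => hnd ((ofList_length_iff sub).mp hl)
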